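-- pv_equiv track=rewrite | github.com/sanjaysrivastav98/coding | MAXSC.py | search
-- ===== SOURCE A (Python) =====
-- def search(a,ele):
-- 	n=len(a)
-- 	if n==1:
-- 		if ele>a[0]:
-- 			return a[0]
-- 		else:
-- 			return -1
-- 	elif n==2:
-- 		if a[0]>=ele:
-- 			return -1
-- 		elif a[1]<ele:
-- 			return a[1]
-- 		elif a[1] >= ele and a[0]<ele:
-- 			return a[0]
-- 	else:
-- 		if a[n//2]>=ele:
-- 			return search(a[:n//2+1],ele)
-- 		else:
-- 			return search(a[n//2:],ele)
-- ===== SOURCE B (Python) =====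
-- def search(a, ele):
--     # iterative two-index descent over [lo, hi); never copies the list
--     lo, hi = 0, len(a)
--     while hi - lo > 2:
--         m = lo + (hi - lo) // 2
--         if a[m] >= ele:
--             hi = m + 1
--         else:
--             lo = m
--     if a[lo] >= ele:
--         return -1
--     return a[hi - 1] if a[hi - 1] < ele else a[lo]
-- ===== Notes on version B (the rewrite author's own statement) =====
-- stated objective: alternative
-- what changed: Replaced A's recursive descent that allocates a fresh slice copy of the list at every level with an iterative two-index (lo,hi) loop over the original list and a unified two-branch epilogue, removing all copying and recursion.
import Mathlib
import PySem

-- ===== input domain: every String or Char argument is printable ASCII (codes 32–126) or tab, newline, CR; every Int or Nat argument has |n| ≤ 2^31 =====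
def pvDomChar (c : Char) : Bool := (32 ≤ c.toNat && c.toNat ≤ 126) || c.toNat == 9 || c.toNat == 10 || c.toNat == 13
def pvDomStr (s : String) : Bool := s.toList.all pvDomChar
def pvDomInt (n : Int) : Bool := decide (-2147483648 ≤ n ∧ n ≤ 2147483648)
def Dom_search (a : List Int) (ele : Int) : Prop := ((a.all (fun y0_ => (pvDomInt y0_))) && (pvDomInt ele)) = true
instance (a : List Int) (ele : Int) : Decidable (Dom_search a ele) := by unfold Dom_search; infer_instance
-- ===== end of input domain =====

-- B replaces A's recursive, slice-copying descent by an iterative two-index loop over the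
-- original list with a unified epilogue (objective: alternative — no slice copies, no recursion).

-- ===== PORT A =====
-- literal transliteration of A; Python slices a[:k] / a[k:] with 0 ≤ k ≤ len(a) are
-- exactly List.take / List.drop; all indexing is in range wherever Python returns
-- (Python raises IndexError only on the empty list, which Pre_ excludes).
def search (a : List Int) (ele : Int) : Int :=
  if _h1 : a.length = 1 then
    if ele > a.getD 0 0 then a.getD 0 0 else -1
  else if _h2 : a.length = 2 then
    if a.getD 0 0 ≥ ele then -1
    else if a.getD 1 0 < ele then a.getD 1 0
    else if a.getD 1 0 ≥ ele ∧ a.getD 0 0 < ele then a.getD 0 0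
    else -1  -- unreachable in Python (the three branches are exhaustive)
  else if _h0 : a.length = 0 then -1  -- Python raises IndexError here (excluded by Pre_)
  else
    if a.getD (a.length / 2) 0 ≥ ele then search (a.take (a.length / 2 + 1)) ele
    else search (a.drop (a.length / 2)) ele
termination_by a.length
decreasing_by all_goals simp; omega

-- ===== PORT B =====
-- the while-loop of Source B as structural recursion on hi - lo, returning the final (lo, hi)
def searchLoop (a : List Int) (ele : Int) (lo hi : Nat) : Nat × Nat :=
  if _h : 2 < hi - lo then
    if a.getD (lo + (hi - lo) / 2) 0 ≥ ele then searchLoop a ele lo (lo + (hi - lo) / 2 + 1)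
    else searchLoop a ele (lo + (hi - lo) / 2) hi
  else (lo, hi)
termination_by hi - lo
decreasing_by all_goals omega

-- Source B's code after the loop (indexing in range whenever the list is nonempty)
def tailCase (a : List Int) (ele : Int) (p : Nat × Nat) : Int :=
  if a.getD p.1 0 ≥ ele then -1
  else if a.getD (p.2 - 1) 0 < ele then a.getD (p.2 - 1) 0
  else a.getD p.1 0

def search_alt (a : List Int) (ele : Int) : Int :=
  tailCase a ele (searchLoop a ele 0 a.length)

-- ===== PRECONDITION & SPEC =====
-- Pre_ excludes only the empty list, on which A raises IndexError (a[n//2] on []).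
def Pre_search (a : List Int) (ele : Int) : Prop := a ≠ []
instance (a : List Int) (ele : Int) : Decidable (Pre_search a ele) := by
  unfold Pre_search; infer_instance

def pvWitness_search : List Int × Int := ([1, 3, 5], 4)

def Spec_search (a : List Int) (ele : Int) (out : Int) : Prop := out = search_alt a ele
instance (a : List Int) (ele : Int) (out : Int) : Decidable (Spec_search a ele out) := by
  unfold Spec_search; infer_instance

-- ===== CLAIM (what is proved, stated in full; the proofs are below) =====
def Claim_equal_search : Prop :=
  ∀ (a : List Int) (ele : Int), Dom_search a ele → Pre_search a ele →
    Spec_search a ele (search a ele)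

-- ===== LEMMAS AND PROOFS =====

-- reading the segment (a.drop lo).take (hi - lo) at i is reading a at lo + i
theorem seg_getD (a : List Int) (lo hi i : Nat) (hhi : hi ≤ a.length) (hik : i < hi - lo) :
    ((a.drop lo).take (hi - lo)).getD i 0 = a.getD (lo + i) 0 := by
  have h1 : lo + i < a.length := by omega
  have h2 : i < ((a.drop lo).take (hi - lo)).length := by simp; omega
  rw [List.getD_eq_getElem _ _ h2, List.getD_eq_getElem _ _ h1]
  simp

-- A on the segment [lo, hi) of a equals B's loop followed by B's epilogue
theorem searchA_loop (a : List Int) (ele : Int) (lo hi : Nat) (hhi : hi ≤ a.length)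
    (hlh : lo < hi) :
    search ((a.drop lo).take (hi - lo)) ele = tailCase a ele (searchLoop a ele lo hi) := by
  set s := (a.drop lo).take (hi - lo) with hs
  have hlen : s.length = hi - lo := by rw [hs]; simp; omega
  have e0 : s.getD 0 0 = a.getD (lo + 0) 0 := seg_getD a lo hi 0 hhi (by omega)
  by_cases h1 : hi - lo = 1
  · rw [search, dif_pos (by omega : s.length = 1),
      searchLoop, dif_neg (by omega : ¬ 2 < hi - lo)]
    unfold tailCase
    simp only [e0, Nat.add_zero]
    have e2 : hi - 1 = lo := by omega
    rw [e2]
    split_ifs <;> omega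
  · by_cases h2 : hi - lo = 2
    · rw [search, dif_neg (by omega : ¬ s.length = 1), dif_pos (by omega : s.length = 2),
        searchLoop, dif_neg (by omega : ¬ 2 < hi - lo)]
      unfold tailCase
      have e1 : s.getD 1 0 = a.getD (lo + 1) 0 := seg_getD a lo hi 1 hhi (by omega)
      simp only [e0, e1, Nat.add_zero]
      have e2 : hi - 1 = lo + 1 := by omega
      rw [e2]
      split_ifs <;> omega
    · have h3 : 2 < hi - lo := by omega
      have hmlt : lo + (hi - lo) / 2 < a.length := by omega
      have em : s.getD (s.length / 2) 0 = a.getD (lo + (hi - lo) / 2) 0 := by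
        rw [hlen]; exact seg_getD a lo hi ((hi - lo) / 2) hhi (by omega)
      rw [search, dif_neg (by omega : ¬ s.length = 1), dif_neg (by omega : ¬ s.length = 2),
        dif_neg (by omega : ¬ s.length = 0), searchLoop, dif_pos h3, em]
      by_cases hc : a.getD (lo + (hi - lo) / 2) 0 ≥ ele
      · rw [if_pos hc, if_pos hc]
        have hseg : s.take (s.length / 2 + 1) =
            (a.drop lo).take ((lo + (hi - lo) / 2 + 1) - lo) := by
          rw [hlen, hs, List.take_take]
          congr 1
          omega
        rw [hseg]
        exact searchA_loop a ele lo (lo + (hi - lo) / 2 + 1) (by omega) (by omega)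
      · rw [if_neg hc, if_neg hc]
        have hseg : s.drop (s.length / 2) =
            (a.drop (lo + (hi - lo) / 2)).take (hi - (lo + (hi - lo) / 2)) := by
          rw [hlen, hs, List.drop_take, List.drop_drop]
          congr 1
          omega
        rw [hseg]
        exact searchA_loop a ele (lo + (hi - lo) / 2) hi hhi (by omega)
termination_by hi - lo
decreasing_by all_goals omega

-- ===== VERDICT (by name: the statement is the Claim_ definition above) =====
theorem search_spec : Claim_equal_search := by
  intro a ele _hd hpre
  unfold Spec_search search_alt
  have hpos : 0 < a.length := List.length_pos_iff.mpr hpre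
  have h := searchA_loop a ele 0 a.length (le_refl _) hpos
  simpa using h
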